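-- pv_equiv track=rewrite | github.com/gabozako/AlgoQueen | suy2on/CodingTest/2022_line/2.py | solution
-- ===== SOURCE A (Python) =====
-- from typing import List
-- import collections
--
-- def solution(k: int, dic: List[str], chat: str) -> str:
--     answer = []
--
--     chats = chat.split()
--
--     for chat in chats:
--         bw = False
--         freqs = dict(collections.Counter(chat))
--         head = chat.replace(".", "a")
--         tail = chat.replace(".", "z" * k)
--         for d in dic:
--             # 일치
--             if chat == d:
--                 bw = True
--                 break
--
--             if len(head) <= len(d) <= len(tail) and head <= d <= tail:
--                 check = True
--                 for key in freqs.keys():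
--                     if key != "." and freqs[key] > d.count(key):
--                         check = False
--                 if check:
--                     bw = True
--                     break
--
--         if bw:
--             answer.append("#" * len(chat))
--         else:
--             answer.append(chat)
--
--     return " ".join(answer)
-- ===== SOURCE B (Python) =====
-- from typing import List
--
--
-- def _bisect_left(a, x):
--     lo, hi = 0, len(a)
--     while lo < hi:
--         mid = (lo + hi) // 2
--         if a[mid] < x:
--             lo = mid + 1
--         else:
--             hi = mid
--     return lo
--
--
-- def _bisect_right(a, x):
--     lo, hi = 0, len(a)
--     while lo < hi:
--         mid = (lo + hi) // 2
--         if x < a[mid]: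
--             hi = mid
--         else:
--             lo = mid + 1
--     return lo
--
--
-- def solution(k: int, dic: List[str], chat: str) -> str:
--     sdic = sorted(dic)
--     exact = set(dic)
--     out = []
--     for w in chat.split():
--         head = w.replace(".", "a")
--         tail = w.replace(".", "z" * k)
--         lo = _bisect_left(sdic, head)
--         hi = _bisect_right(sdic, tail)
--         matched = w in exact or any(
--             len(head) <= len(d) <= len(tail)
--             and all(w.count(c) <= d.count(c) for c in set(w) if c != ".")
--             for d in sdic[lo:hi]
--         )
--         out.append("#" * len(w) if matched else w)
--     return " ".join(out)
-- ===== Notes on version B (the rewrite author's own statement) =====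
-- stated objective: alternative
-- what changed: B sorts the dictionary once and binary-searches (hand-written bisect) the lexicographic window [head, tail] for each chat word, testing only the candidates in that slice plus an exact-match set lookup, instead of A's full linear scan per word; the frequency test uses direct character counts over set(word) instead of a Counter dict.
import Mathlib
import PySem

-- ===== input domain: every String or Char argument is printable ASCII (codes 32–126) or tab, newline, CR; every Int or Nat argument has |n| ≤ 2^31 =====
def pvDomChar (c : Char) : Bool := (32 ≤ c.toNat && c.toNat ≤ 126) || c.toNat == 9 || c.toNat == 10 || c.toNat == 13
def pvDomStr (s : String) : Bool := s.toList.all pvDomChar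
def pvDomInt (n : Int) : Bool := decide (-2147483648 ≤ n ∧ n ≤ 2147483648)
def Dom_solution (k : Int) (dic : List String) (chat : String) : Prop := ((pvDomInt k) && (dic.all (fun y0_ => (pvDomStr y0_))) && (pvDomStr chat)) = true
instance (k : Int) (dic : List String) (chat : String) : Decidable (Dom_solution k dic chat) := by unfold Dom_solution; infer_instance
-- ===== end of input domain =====

-- B replaces A's full scan of the dictionary per chat word by one initial sort plus binary
-- searches (hand-written bisect) that restrict the candidates to the lexicographic window
-- [head, tail], with an exact-match set lookup, and drops the Counter dict in favour of
-- direct character counts; objective: alternative (same cost on the measured inputs).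
-- All string comparisons are ported on `List Char` (PySem strings are exact on that side);
-- Python's `s <= t` is `decide (s.toList ≤ t.toList)` — lexicographic by code point, exact.

-- ===== PORT A =====
-- Python's `s <= t` on strings, on the `List Char` side (lexicographic by code point, exact)
def pvLe {α : Type} [LinearOrder α] (s t : α) : Bool := decide (s ≤ t)

-- the inner `for d in dic` loop of A, with its break/flag `bw` as the Bool result
def solutionLoop (w : List Char) (freqs : PySem.Dict Char Int) (head tail : List Char) : List String → Bool
  | [] => false
  | s :: rest =>
    let d := s.toList
    if w == d then true
    else if decide (head.length ≤ d.length) && decide (d.length ≤ tail.length) &&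
            pvLe head d && pvLe d tail then
      let check := freqs.keys.foldl (fun check key =>
        if (key != '.') && decide (freqs.getD key 0 > (PySem.Chars.count d [key] : Int)) then false
        else check) true
      if check then true else solutionLoop w freqs head tail rest
    else solutionLoop w freqs head tail rest

def solution (k : Int) (dic : List String) (chat : String) : String :=
  let chats := PySem.Str.split₀ chat
  let answer : List String := chats.foldl (fun answer c =>
    let w := c.toList
    let freqs := PySem.Dict.counter w
    let head := PySem.Chars.replace w ['.'] ['a']
    let tail := PySem.Chars.replace w ['.'] (PySem.List.pyRepeat ['z'] k)
    let bw := solutionLoop w freqs head tail dic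
    if bw then answer ++ [String.ofList (PySem.List.pyRepeat ['#'] (w.length : Int))]
    else answer ++ [c]) []
  PySem.Str.join " " answer

-- ===== PORT B =====
-- Source B's sorted(dic) / hand-written _bisect_left/_bisect_right, over `List Char`
-- (the LinearOrder instances on List Char are the Python string order, exact by code point)
def pvSorted {α : Type} [LinearOrder α] (xs : List α) : List α :=
  PySem.List.sorted xs (fun d => d) false
def pvBisectLeft {α : Type} [LinearOrder α] (xs : List α) (x : α) : Nat :=
  PySem.List.bisectLeft xs x
def pvBisectRight {α : Type} [LinearOrder α] (xs : List α) (x : α) : Nat :=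
  PySem.List.bisectRight xs x

def solution_alt (k : Int) (dic : List String) (chat : String) : String :=
  let sdic := pvSorted (dic.map (·.toList))
  let exact := PySem.Set.ofList (dic.map (·.toList))
  let out := (PySem.Str.split₀ chat).map (fun c =>
    let w := c.toList
    let head := PySem.Chars.replace w ['.'] ['a']
    let tail := PySem.Chars.replace w ['.'] (PySem.List.pyRepeat ['z'] k)
    let lo := pvBisectLeft sdic head
    let hi := pvBisectRight sdic tail
    let matched := exact.contains w ||
      (PySem.List.slice sdic (some (lo : Int)) (some (hi : Int))).any (fun d =>
        decide (head.length ≤ d.length) && decide (d.length ≤ tail.length) &&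
        (PySem.Set.ofList w).all (fun ch =>
          ch == '.' || decide (PySem.Chars.count w [ch] ≤ PySem.Chars.count d [ch])))
    if matched then String.ofList (PySem.List.pyRepeat ['#'] (w.length : Int)) else c)
  PySem.Str.join " " out

-- ===== PRECONDITION & SPEC =====
def Spec_solution (k : Int) (dic : List String) (chat : String) (out : String) : Prop := out = solution_alt k dic chat
instance (k : Int) (dic : List String) (chat : String) (out : String) : Decidable (Spec_solution k dic chat out) := by unfold Spec_solution; infer_instance

-- ===== CLAIM (what is proved, stated in full; the proofs are below) =====
def Claim_equal_solution : Prop := ∀ (k : Int) (dic : List String) (chat : String), Dom_solution k dic chat → Spec_solution k dic chat (solution k dic chat)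

-- ===== LEMMAS AND PROOFS =====

theorem pvBisectLeftLoop_spec {α : Type} [LinearOrder α] (xs : List α) (x : α)
    (hs : xs.Pairwise (· ≤ ·)) :
    ∀ (fuel lo hi : Nat), lo ≤ hi → hi ≤ xs.length → hi - lo ≤ fuel →
      (∀ j (hj : j < xs.length), j < lo → xs[j] < x) →
      (∀ j (hj : j < xs.length), hi ≤ j → x ≤ xs[j]) →
      (∀ j (hj : j < xs.length), j < PySem.List.bisectLeftLoop xs x fuel lo hi → xs[j] < x) ∧
      (∀ j (hj : j < xs.length), PySem.List.bisectLeftLoop xs x fuel lo hi ≤ j → x ≤ xs[j]) := by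
  have hmono := List.pairwise_iff_getElem.mp hs
  intro fuel
  induction fuel with
  | zero =>
    intro lo hi hlh hhl hf hbefore hafter
    rw [PySem.List.bisectLeftLoop.eq_1]
    have : lo = hi := by omega
    subst this
    exact ⟨hbefore, hafter⟩
  | succ fuel ih =>
    intro lo hi hlh hhl hf hbefore hafter
    rw [PySem.List.bisectLeftLoop.eq_2]
    by_cases hlt : lo < hi
    · rw [if_pos hlt]
      have hmid : (lo + hi) / 2 < xs.length := by omega
      rw [List.getElem?_eq_getElem hmid]
      simp only
      by_cases hyx : xs[(lo + hi) / 2] < x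
      · rw [if_pos hyx]
        apply ih ((lo + hi) / 2 + 1) hi (by omega) hhl (by omega)
        · intro j hj hjlo
          rcases Nat.lt_or_ge j ((lo + hi) / 2) with h | h
          · exact lt_of_le_of_lt (hmono j ((lo+hi)/2) hj hmid h) hyx
          · have : j = (lo + hi) / 2 := by omega
            subst this; exact hyx
        · exact hafter
      · rw [if_neg hyx]
        apply ih lo ((lo + hi) / 2) (by omega) (by omega) (by omega) hbefore
        intro j hj hmj
        rcases Nat.lt_or_ge ((lo + hi) / 2) j with h | h
        · exact le_trans (not_lt.mp hyx) ((hmono ((lo+hi)/2) j hmid hj h))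
        · have : j = (lo + hi) / 2 := by omega
          subst this; exact not_lt.mp hyx
    · rw [if_neg hlt]
      have : lo = hi := by omega
      subst this
      exact ⟨hbefore, hafter⟩

theorem pvBisectRightLoop_spec {α : Type} [LinearOrder α] (xs : List α) (x : α)
    (hs : xs.Pairwise (· ≤ ·)) :
    ∀ (fuel lo hi : Nat), lo ≤ hi → hi ≤ xs.length → hi - lo ≤ fuel →
      (∀ j (hj : j < xs.length), j < lo → xs[j] ≤ x) →
      (∀ j (hj : j < xs.length), hi ≤ j → x < xs[j]) →
      (∀ j (hj : j < xs.length), j < PySem.List.bisectRightLoop xs x fuel lo hi → xs[j] ≤ x) ∧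
      (∀ j (hj : j < xs.length), PySem.List.bisectRightLoop xs x fuel lo hi ≤ j → x < xs[j]) := by
  have hmono := List.pairwise_iff_getElem.mp hs
  intro fuel
  induction fuel with
  | zero =>
    intro lo hi hlh hhl hf hbefore hafter
    rw [PySem.List.bisectRightLoop.eq_1]
    have : lo = hi := by omega
    subst this
    exact ⟨hbefore, hafter⟩
  | succ fuel ih =>
    intro lo hi hlh hhl hf hbefore hafter
    rw [PySem.List.bisectRightLoop.eq_2]
    by_cases hlt : lo < hi
    · rw [if_pos hlt]
      have hmid : (lo + hi) / 2 < xs.length := by omega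
      rw [List.getElem?_eq_getElem hmid]
      simp only
      by_cases hxy : x < xs[(lo + hi) / 2]
      · rw [if_pos hxy]
        apply ih lo ((lo + hi) / 2) (by omega) (by omega) (by omega) hbefore
        intro j hj hmj
        rcases Nat.lt_or_ge ((lo + hi) / 2) j with h | h
        · exact lt_of_lt_of_le hxy (hmono ((lo+hi)/2) j hmid hj h)
        · have : j = (lo + hi) / 2 := by omega
          subst this; exact hxy
      · rw [if_neg hxy]
        apply ih ((lo + hi) / 2 + 1) hi (by omega) hhl (by omega)
        · intro j hj hjlo
          rcases Nat.lt_or_ge j ((lo + hi) / 2) with h | h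
          · exact le_trans (hmono j ((lo+hi)/2) hj hmid h) (not_lt.mp hxy)
          · have : j = (lo + hi) / 2 := by omega
            subst this; exact not_lt.mp hxy
        · exact hafter
    · rw [if_neg hlt]
      have : lo = hi := by omega
      subst this
      exact ⟨hbefore, hafter⟩

theorem pvBisectLeft_spec {α : Type} [LinearOrder α] (xs : List α) (x : α)
    (hs : xs.Pairwise (· ≤ ·)) :
    (∀ j (hj : j < xs.length), j < pvBisectLeft xs x → xs[j] < x) ∧
    (∀ j (hj : j < xs.length), pvBisectLeft xs x ≤ j → x ≤ xs[j]) := by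
  have := pvBisectLeftLoop_spec xs x hs xs.length 0 xs.length (Nat.zero_le _) le_rfl (by omega)
    (by intro j hj h; omega) (by intro j hj h; omega)
  simpa [pvBisectLeft, PySem.List.bisectLeft] using this

theorem pvBisectRight_spec {α : Type} [LinearOrder α] (xs : List α) (x : α)
    (hs : xs.Pairwise (· ≤ ·)) :
    (∀ j (hj : j < xs.length), j < pvBisectRight xs x → xs[j] ≤ x) ∧
    (∀ j (hj : j < xs.length), pvBisectRight xs x ≤ j → x < xs[j]) := by
  have := pvBisectRightLoop_spec xs x hs xs.length 0 xs.length (Nat.zero_le _) le_rfl (by omega)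
    (by intro j hj h; omega) (by intro j hj h; omega)
  simpa [pvBisectRight, PySem.List.bisectRight] using this

theorem pv_mem_slice_iff {α : Type} [LinearOrder α] (xs : List α) (head tail y : α)
    (hs : xs.Pairwise (· ≤ ·)) :
    (y ∈ (xs.drop (pvBisectLeft xs head)).take (pvBisectRight xs tail - pvBisectLeft xs head)
      ↔ y ∈ xs ∧ head ≤ y ∧ y ≤ tail) := by
  obtain ⟨hL1, hL2⟩ := pvBisectLeft_spec xs head hs
  obtain ⟨hR1, hR2⟩ := pvBisectRight_spec xs tail hs
  set L := pvBisectLeft xs head with hLdef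
  set R := pvBisectRight xs tail with hRdef
  constructor
  · intro hy
    obtain ⟨i, hi, hEq⟩ := List.mem_iff_getElem.mp hy
    have hlen : ((xs.drop L).take (R - L)).length = min (R - L) (xs.length - L) := by
      simp [List.length_take, List.length_drop]
    have hi' : i < min (R - L) (xs.length - L) := hlen ▸ hi
    have hLi : L + i < xs.length := by omega
    have hval : y = xs[L + i] := by
      rw [← hEq]; rw [List.getElem_take]; rw [List.getElem_drop]
    refine ⟨hval ▸ List.getElem_mem hLi, ?_, ?_⟩
    · rw [hval]; exact hL2 (L + i) hLi (by omega)
    · rw [hval]; exact hR1 (L + i) hLi (by omega)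
  · rintro ⟨hy, hhead, htail⟩
    obtain ⟨j, hj, hEq⟩ := List.mem_iff_getElem.mp hy
    have hLj : L ≤ j := by
      by_contra h
      exact absurd (hEq ▸ hL1 j hj (by omega)) (not_lt.mpr hhead)
    have hjR : j < R := by
      by_contra h
      exact absurd (hEq ▸ hR2 j hj (by omega)) (not_lt.mpr htail)
    apply List.mem_iff_getElem.mpr
    refine ⟨j - L, ?_, ?_⟩
    · simp [List.length_take, List.length_drop]; omega
    · rw [List.getElem_take, List.getElem_drop]
      have : L + (j - L) = j := by omega
      simp only [this]
      exact hEq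

theorem pvSorted_perm {α : Type} [LinearOrder α] (xs : List α) : (pvSorted xs).Perm xs :=
  PySem.List.sorted_perm xs (fun d => d) false

theorem pvSorted_pairwise {α : Type} [LinearOrder α] (xs : List α) : (pvSorted xs).Pairwise (· ≤ ·) := by
  simpa [pvSorted] using PySem.List.sorted_pairwise xs (fun d => d)

theorem solutionLoop_eq_any (w : List Char) (freqs : PySem.Dict Char Int) (head tail : List Char)
    (l : List String) :
    solutionLoop w freqs head tail l =
      l.any (fun s =>
        (w == s.toList) ||
        (decide (head.length ≤ s.toList.length) && decide (s.toList.length ≤ tail.length) &&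
         pvLe head s.toList && pvLe s.toList tail &&
         freqs.keys.foldl (fun check key =>
           if (key != '.') && decide (freqs.getD key 0 > (PySem.Chars.count s.toList [key] : Int)) then false
           else check) true)) := by
  induction l with
  | nil => rfl
  | cons s rest ih =>
    rw [List.any_cons, ← ih]
    show (if (w == s.toList) = true then true
          else if (decide (head.length ≤ s.toList.length) && decide (s.toList.length ≤ tail.length) &&
              pvLe head s.toList && pvLe s.toList tail) = true then
            (if (freqs.keys.foldl (fun check key =>
              if (key != '.') && decide (freqs.getD key 0 > (PySem.Chars.count s.toList [key] : Int)) then false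
              else check) true) = true then true else solutionLoop w freqs head tail rest)
          else solutionLoop w freqs head tail rest) = _
    cases hw : (w == s.toList) <;>
      cases hc1 : (decide (head.length ≤ s.toList.length) && decide (s.toList.length ≤ tail.length) &&
              pvLe head s.toList && pvLe s.toList tail) <;>
      cases hck : (freqs.keys.foldl (fun check key =>
              if (key != '.') && decide (freqs.getD key 0 > (PySem.Chars.count s.toList [key] : Int)) then false
              else check) true) <;>
      simp_all

theorem pvCount_singleton (ch : Char) (w : List Char) :
    PySem.Chars.count w [ch] = w.count ch := by
  have go_spec : ∀ (fuel : Nat) (l : List Char) (acc : Nat), l.length ≤ fuel →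
      PySem.Chars.count.go [ch] fuel l acc = acc + l.count ch := by
    intro fuel
    induction fuel with
    | zero =>
      intro l acc hl
      have : l = [] := List.eq_nil_of_length_eq_zero (by omega)
      subst this; rfl
    | succ fuel ih =>
      intro l acc hl
      cases l with
      | nil => rfl
      | cons h t =>
        show (if [ch].isPrefixOf (h :: t) = true then
                PySem.Chars.count.go [ch] fuel (List.drop [ch].length (h :: t)) (acc + 1)
              else PySem.Chars.count.go [ch] fuel t acc) = acc + (h :: t).count ch
        have hpre : [ch].isPrefixOf (h :: t) = (ch == h) := by
          simp [List.isPrefixOf]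
        rw [hpre]
        cases hch : (ch == h) with
        | true =>
          rw [if_pos rfl]
          simp only [List.length_cons, List.length_nil, List.drop_succ_cons, List.drop_zero] at *
          rw [ih t (acc + 1) (by simpa using hl)]
          rw [List.count_cons]
          have : (h == ch) = true := by simp_all
          simp only [this, if_pos]
          omega
        | false =>
          rw [if_neg (by simp)]
          rw [ih t acc (by simpa using hl)]
          rw [List.count_cons]
          have : (h == ch) = false := by simp_all [BEq.comm]
          rw [this]
          simp
  show (if ([ch] : List Char).isEmpty = true then w.length + 1 else PySem.Chars.count.go [ch] w.length w 0) = w.count ch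
  rw [if_neg (by simp)]
  simpa using go_spec w.length w 0 le_rfl

theorem pvCheck_eq (w d : List Char) :
    ((PySem.Dict.counter w).keys.foldl (fun check key =>
        if (key != '.') && decide ((PySem.Dict.counter w).getD key 0 > (PySem.Chars.count d [key] : Int)) then false
        else check) true)
    = (PySem.Set.ofList w).all (fun ch =>
        ch == '.' || decide (PySem.Chars.count w [ch] ≤ PySem.Chars.count d [ch])) := by
  rw [PySem.List.foldl_if_false_eq]
  rw [Bool.true_and, PySem.Dict.keys_counter]
  rw [List.not_any_eq_all_not]
  apply List.all_congr rfl
  intro ch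
  simp only [PySem.Dict.getD_counter, pvCount_singleton, Bool.not_and, Bool.not_not, bne]
  cases hd : (ch == '.') with
  | true => simp
  | false =>
    simp only [Bool.false_or]
    by_cases h : w.count ch ≤ d.count ch
    · simp [h]
    · have h2 : ((d.count ch : Int)) < ((w.count ch : Int)) := by
        have : d.count ch < w.count ch := by omega
        exact_mod_cast this
      simp [h, h2]

theorem pvLe_iff {α : Type} [LinearOrder α] (s t : α) : pvLe s t = true ↔ s ≤ t := by
  simp [pvLe]

theorem pv_word_eq (dic : List String) (w head tail : List Char) :
    solutionLoop w (PySem.Dict.counter w) head tail dic =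
      ((PySem.Set.ofList (dic.map (·.toList))).contains w ||
       (PySem.List.slice (pvSorted (dic.map (·.toList)))
          (some ((pvBisectLeft (pvSorted (dic.map (·.toList))) head : Nat) : Int))
          (some ((pvBisectRight (pvSorted (dic.map (·.toList))) tail : Nat) : Int))).any (fun d =>
          decide (head.length ≤ d.length) && decide (d.length ≤ tail.length) &&
          (PySem.Set.ofList w).all (fun ch =>
            ch == '.' || decide (PySem.Chars.count w [ch] ≤ PySem.Chars.count d [ch])))) := by
  have hpair := pvSorted_pairwise (dic.map (·.toList))
  have hperm := pvSorted_perm (dic.map (·.toList))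
  rw [solutionLoop_eq_any, PySem.List.slice_natCast]
  simp only [pvCheck_eq]
  apply Bool.eq_iff_iff.mpr
  simp only [List.any_eq_true, Bool.or_eq_true, Bool.and_eq_true, pvLe_iff, beq_iff_eq,
    decide_eq_true_eq, PySem.Set.contains_iff, PySem.Set.mem_ofList, List.mem_map,
    pv_mem_slice_iff _ _ _ _ hpair, hperm.mem_iff]
  constructor
  · rintro ⟨s, hs, h | ⟨⟨⟨⟨hd1, hd2⟩, hp1⟩, hp2⟩, hchk⟩⟩
    · exact Or.inl ⟨s, hs, h.symm⟩
    · exact Or.inr ⟨s.toList, ⟨⟨s, hs, rfl⟩, hp1, hp2⟩, ⟨hd1, hd2⟩, hchk⟩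
  · rintro (⟨s, hs, h⟩ | ⟨d, ⟨⟨s, hs, rfl⟩, hp1, hp2⟩, ⟨hd1, hd2⟩, hchk⟩)
    · exact ⟨s, hs, Or.inl h.symm⟩
    · exact ⟨s, hs, Or.inr ⟨⟨⟨⟨hd1, hd2⟩, hp1⟩, hp2⟩, hchk⟩⟩

-- ===== VERDICT (by name: the statement is the Claim_ definition above) =====
theorem solution_spec : Claim_equal_solution := by
  intro k dic chat _
  show solution k dic chat = solution_alt k dic chat
  simp only [solution, solution_alt]
  congr 1
  rw [show (fun (answer : List String) (c : String) =>
        if solutionLoop c.toList (PySem.Dict.counter c.toList)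
            (PySem.Chars.replace c.toList ['.'] ['a'])
            (PySem.Chars.replace c.toList ['.'] (PySem.List.pyRepeat ['z'] k)) dic then
          answer ++ [String.ofList (PySem.List.pyRepeat ['#'] (c.toList.length : Int))]
        else answer ++ [c]) =
      (fun (answer : List String) (c : String) =>
        answer ++ [if solutionLoop c.toList (PySem.Dict.counter c.toList)
            (PySem.Chars.replace c.toList ['.'] ['a'])
            (PySem.Chars.replace c.toList ['.'] (PySem.List.pyRepeat ['z'] k)) dic then
          String.ofList (PySem.List.pyRepeat ['#'] (c.toList.length : Int))
        else c]) from funext fun acc => funext fun c => by split <;> rfl]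
  rw [PySem.List.foldl_append_singleton_eq_map, List.nil_append]
  apply List.map_congr_left
  intro c _
  rw [pv_word_eq]
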